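-- pv_equiv track=rewrite | github.com/chrislam14/projects | python projects/HawaiianWords.py | pronunciate
-- ===== SOURCE A (Python) =====
-- HAWAIIANCONSTS = ['p','k','l','m','n','w']
--
-- VOWELS = ['a','e','i','o','u',]
--
-- VALIDVOWELCOMBOS = ['ai','ae','ao','au','ei','eu','iu','oi','ou','ui']
--
-- def Wpronunciate(word:str)->str:
--     '''returns the Hawaiian pronunciation of w'''
--     if word == 'i' or word == 'e':
--         return 'v'
--     else:
--         return 'w'
--
-- def VCpronunciate(combo:str)->str:
--     '''returns the Hawaiian pronunciation of vowel and w combos'''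
--     svpron = ['ah','eh','ee','oh','oo']
--     Vdict = {'ai':'eye','ae':'eye','ao':'ow',
--              'au':'ow','ei':'ay','eu':'eh-oo',
--              'iu':'ew','oi':'oy','ou':'ow','ui':'ooey'}
--     result = ''
--     if combo not in VALIDVOWELCOMBOS:
--             for l in combo:
--                 for v in range(len(VOWELS)):
--                     if VOWELS[v] == l:
--                         result += svpron[v]+'-'
--     else:
--         result = Vdict[combo]+'-'
--     return result
--
-- def formatstr(word:str)->str:
--     '''formats a string by capitalizing each word
--         and removing unnecessary dashes'''
--     word = word.replace('- ', ' ')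
--     word = word.replace('-\'','\'')
--     word = word.strip('-')
--     word = word.split()
--     for w in range(len(word)):
--         word[w] = word[w].capitalize()
--     word = ' '.join(word)
--     return word
--
-- def pronunciate(phrase:str)->str:
--     '''returns the Hawaiian pronunciation of words'''
--     c = 0
--     result = ''
--     phrase = phrase.lower()
--     if phrase[0] == 'w':
--             result += 'w'
--             c += 1
--     while c < len(phrase):
--         if phrase[c] in HAWAIIANCONSTS:
--             if phrase[c] == "w":
--                 p1 = Wpronunciate(phrase[c-1])
--             else:
--                 p1 = phrase[c]
--             result+= p1
--             c += 1
--         elif phrase[c] in VOWELS: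
--             if c == len(phrase)-1:
--                 vc = phrase[c]
--             else:
--                 vc = phrase[c]+phrase[c+1]
--             p2 = VCpronunciate(vc)
--             result += p2
--             for v in vc:
--                 if v in VOWELS:
--                     c += 1
--         else:
--             result += phrase[c]
--             c += 1
--
--     result = formatstr(result)
--     return result
-- ===== SOURCE B (Python) =====
-- HAWAIIANCONSTS = ['p','k','l','m','n','w']
-- VOWELS = ['a','e','i','o','u']
-- SVPRON = {'a': 'ah', 'e': 'eh', 'i': 'ee', 'o': 'oh', 'u': 'oo'}
-- VDICT = {'ai': 'eye', 'ae': 'eye', 'ao': 'ow',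
--          'au': 'ow', 'ei': 'ay', 'eu': 'eh-oo',
--          'iu': 'ew', 'oi': 'oy', 'ou': 'ow', 'ui': 'ooey'}
--
--
-- def _tokens(prev, rest):
--     '''first pass: split the lowered text into tokens, each a (kind, text) pair;
--     prev tracks the previously consumed character for the w-lookback'''
--     toks = []
--     while rest:
--         ch = rest[0]
--         if ch in HAWAIIANCONSTS:
--             toks.append(('w', prev) if ch == 'w' else ('c', ch))
--             prev, rest = ch, rest[1:]
--         elif ch in VOWELS:
--             if len(rest) >= 2 and rest[1] in VOWELS:
--                 toks.append(('vv', ch + rest[1]))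
--                 prev, rest = rest[1], rest[2:]
--             else:
--                 toks.append(('v', ch))
--                 prev, rest = ch, rest[1:]
--         else:
--             toks.append(('x', ch))
--             prev, rest = ch, rest[1:]
--     return toks
--
--
-- def _sound(tok):
--     '''second pass: one token -> its pronunciation piece'''
--     kind, text = tok
--     if kind == 'w':
--         return 'v' if text in ('i', 'e') else 'w'
--     if kind == 'c' or kind == 'x':
--         return text
--     if kind == 'v':
--         return SVPRON[text] + '-'
--     # kind == 'vv'
--     if text in VDICT:
--         return VDICT[text] + '-'
--     return SVPRON[text[0]] + '-' + SVPRON[text[1]] + '-'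
--
--
-- def pronunciate(phrase: str) -> str:
--     '''returns the Hawaiian pronunciation of words'''
--     s = phrase.lower()
--     if s == '':
--         return ''
--     if s[0] == 'w':
--         head, prev, rest = 'w', 'w', s[1:]
--     else:
--         head, prev, rest = '', s[0], s
--     word = head + ''.join(_sound(t) for t in _tokens(prev, rest))
--     word = word.replace('- ', ' ').replace("-'", "'").strip('-')
--     return ' '.join(w.capitalize() for w in word.split())
-- ===== Notes on version B (the rewrite author's own statement) =====
-- stated objective: alternative
-- what changed: Replaces A's single index-driven while loop (with in-place index jumps and lookback indexing) by a two-pass design: a tokenizer that splits the lowered text into (kind, text) tokens and a per-token sound table, joined and then formatted.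
import Mathlib
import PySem

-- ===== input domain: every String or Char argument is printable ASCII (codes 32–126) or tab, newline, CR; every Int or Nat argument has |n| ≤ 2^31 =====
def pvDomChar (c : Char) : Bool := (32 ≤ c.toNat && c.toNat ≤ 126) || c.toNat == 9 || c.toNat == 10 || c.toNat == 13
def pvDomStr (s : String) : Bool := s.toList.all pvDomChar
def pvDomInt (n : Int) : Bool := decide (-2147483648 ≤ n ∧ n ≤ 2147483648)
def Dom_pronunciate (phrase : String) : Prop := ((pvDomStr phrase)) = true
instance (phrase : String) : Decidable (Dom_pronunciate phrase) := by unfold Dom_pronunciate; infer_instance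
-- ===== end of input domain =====

-- B re-implements the index-driven while loop as two passes — tokenise the lowered text
-- into (kind, text) tokens, then map each token to its sound — same return value; same cost class.

-- shared module constants (both Pythons use the same tables)
def pvVOWELS : List Char := ['a', 'e', 'i', 'o', 'u']
def pvHCONS : List Char := ['p', 'k', 'l', 'm', 'n', 'w']
def pvCOMBOS : List (List Char) :=
  [['a','i'], ['a','e'], ['a','o'], ['a','u'], ['e','i'],
   ['e','u'], ['i','u'], ['o','i'], ['o','u'], ['u','i']]
def pvVDICT : PySem.Dict (List Char) (List Char) :=
  PySem.Dict.ofList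
    [(['a','i'], ['e','y','e']), (['a','e'], ['e','y','e']), (['a','o'], ['o','w']),
     (['a','u'], ['o','w']), (['e','i'], ['a','y']), (['e','u'], ['e','h','-','o','o']),
     (['i','u'], ['e','w']), (['o','i'], ['o','y']), (['o','u'], ['o','w']),
     (['u','i'], ['o','o','e','y'])]

-- str.capitalize(): first char uppercased, rest lowered — hand port, exact on ASCII (both Pythons call it)
def pvCapitalize (w : List Char) : List Char :=
  match w with
  | [] => []
  | c :: cs => PySem.Chars.upperChar c :: PySem.Chars.lower cs

-- ===== PORT A =====
-- Wpronunciate (takes/returns a 1-char string, ported as List Char)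
def pvWpron (word : Char) : List Char :=
  if word = 'i' ∨ word = 'e' then ['v'] else ['w']

-- VCpronunciate
def pvVCpron (combo : List Char) : List Char :=
  let svpron : List (List Char) := [['a','h'], ['e','h'], ['e','e'], ['o','h'], ['o','o']]
  if combo ∉ pvCOMBOS then
    combo.foldl (fun result l =>
      (PySem.List.pyRange 0 (PySem.List.len pvVOWELS) 1).foldl (fun result v =>
        if PySem.List.pyGetD pvVOWELS v ' ' = l then
          result ++ PySem.List.pyGetD svpron v [] ++ ['-']
        else result) result) []
  else (PySem.Dict.getD pvVDICT combo []) ++ ['-']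

-- formatstr
def pvFormat (word0 : List Char) : List Char :=
  let word1 := PySem.Chars.replace word0 ['-', ' '] [' ']
  let word2 := PySem.Chars.replace word1 ['-', '\''] ['\'']
  let word3 := PySem.Chars.stripChars word2 ['-']
  let ws := PySem.Chars.split₀ word3
  let ws2 := (PySem.List.pyRange 0 (PySem.List.len ws) 1).foldl
    (fun ws w => PySem.List.pySetD ws w (pvCapitalize (PySem.List.pyGetD ws w []))) ws
  PySem.Chars.join [' '] ws2

-- the while loop of pronunciate (state: index c, accumulator result)
def pvLoopA (l : List Char) (c : Nat) (result : List Char) : List Char :=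
  if h : c < l.length then
    let ch := l[c]
    if ch ∈ pvHCONS then
      pvLoopA l (c + 1)
        (result ++ (if ch = 'w' then pvWpron (PySem.List.pyGetD l ((c : Int) - 1) ' ') else [ch]))
    else if ch ∈ pvVOWELS then
      let vc : List Char :=
        if c = l.length - 1 then [ch] else [ch, PySem.List.pyGetD l ((c : Int) + 1) ' ']
      pvLoopA l (vc.foldl (fun c v => if v ∈ pvVOWELS then c + 1 else c) c) (result ++ pvVCpron vc)
    else
      pvLoopA l (c + 1) (result ++ [ch])
  else result
termination_by l.length - c
decreasing_by
  · omega
  · split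
    · simp only [List.foldl]
      split_ifs <;> omega
    · simp only [List.foldl]
      split_ifs <;> omega
  · omega

def pronunciate (phrase : String) : String :=
  let l := PySem.Chars.lower phrase.toList
  let start : Nat × List Char :=
    if PySem.List.pyGetD l 0 ' ' = 'w' then (1, ['w']) else (0, [])
  String.ofList (pvFormat (pvLoopA l start.1 start.2))

-- ===== PORT B =====
inductive PvTok where
  | w : Char → PvTok
  | c : Char → PvTok
  | v : Char → PvTok
  | vv : Char → Char → PvTok
  | x : Char → PvTok
deriving DecidableEq, Repr

-- SVPRON dict of B
def pvSVD : PySem.Dict Char (List Char) :=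
  PySem.Dict.ofList
    [('a', ['a','h']), ('e', ['e','h']), ('i', ['e','e']), ('o', ['o','h']), ('u', ['o','o'])]

-- first pass: tokenize
def pvTokens : Char → List Char → List PvTok
  | _, [] => []
  | prev, ch :: rest =>
    if ch ∈ pvHCONS then
      (if ch = 'w' then PvTok.w prev else PvTok.c ch) :: pvTokens ch rest
    else if ch ∈ pvVOWELS then
      match rest with
      | c2 :: rest2 =>
        if c2 ∈ pvVOWELS then PvTok.vv ch c2 :: pvTokens c2 rest2
        else PvTok.v ch :: pvTokens ch (c2 :: rest2)
      | [] => [PvTok.v ch]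
    else PvTok.x ch :: pvTokens ch rest
termination_by _ l => l.length
decreasing_by all_goals simp [List.length_cons]

-- second pass: one token → its sound
def pvSound (t : PvTok) : List Char :=
  match t with
  | PvTok.w p => if p = 'i' ∨ p = 'e' then ['v'] else ['w']
  | PvTok.c ch => [ch]
  | PvTok.x ch => [ch]
  | PvTok.v ch => PySem.Dict.getD pvSVD ch [] ++ ['-']
  | PvTok.vv a b =>
    match PySem.Dict.get? pvVDICT [a, b] with
    | some s => s ++ ['-']
    | none => PySem.Dict.getD pvSVD a [] ++ ['-'] ++ (PySem.Dict.getD pvSVD b [] ++ ['-'])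

-- B's format pipeline (capitalize via map, not index assignment)
def pvFormatB (word : List Char) : List Char :=
  PySem.Chars.join [' ']
    ((PySem.Chars.split₀ (PySem.Chars.stripChars
        (PySem.Chars.replace (PySem.Chars.replace word ['-', ' '] [' ']) ['-', '\''] ['\''])
        ['-'])).map pvCapitalize)

def pronunciate_alt (phrase : String) : String :=
  match PySem.Chars.lower phrase.toList with
  | [] => ""
  | c0 :: rest0 =>
    let start : List Char × Char × List Char :=
      if c0 = 'w' then (['w'], 'w', rest0) else ([], c0, c0 :: rest0)
    String.ofList (pvFormatB (start.1 ++ (pvTokens start.2.1 start.2.2).flatMap pvSound))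

-- ===== PRECONDITION & SPEC =====
-- Pre_ excludes only the empty string, on which A's phrase[0] raises IndexError.
def Pre_pronunciate (phrase : String) : Prop := phrase ≠ ""
instance (phrase : String) : Decidable (Pre_pronunciate phrase) := by unfold Pre_pronunciate; infer_instance
def pvWitness_pronunciate : String := "aloha"

def Spec_pronunciate (phrase : String) (out : String) : Prop := out = pronunciate_alt phrase
instance (phrase : String) (out : String) : Decidable (Spec_pronunciate phrase out) := by unfold Spec_pronunciate; infer_instance

-- ===== CLAIM (what is proved, stated in full; the proofs are below) =====
def Claim_equal_pronunciate : Prop := ∀ (phrase : String), Dom_pronunciate phrase → Pre_pronunciate phrase → Spec_pronunciate phrase (pronunciate phrase)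

-- ===== LEMMAS AND PROOFS =====

-- A's formatstr capitalizes word[w] in place over range(len(word)); that loop is a map
lemma pv_foldl_set_map {a : Type} (f : a → a) (d : a) :
    ∀ (suf pre : List a),
      (PySem.List.pyRange (pre.length : Int) ((pre.length : Int) + suf.length) 1).foldl
        (fun ws w => PySem.List.pySetD ws w (f (PySem.List.pyGetD ws w d))) (pre ++ suf)
      = pre ++ suf.map f := by
  intro suf
  induction suf with
  | nil => intro pre; rw [PySem.List.pyRange_one_eq_nil (by simp)]; simp
  | cons s suf ih =>
    intro pre
    rw [PySem.List.pyRange_one_cons (by simp only [List.length_cons]; push_cast; omega)]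
    simp only [List.foldl_cons]
    have hget : PySem.List.pyGetD (pre ++ s :: suf) (pre.length : Int) d = s := by
      simp [List.getD]
    have hset : PySem.List.pySetD (pre ++ s :: suf) (pre.length : Int) (f s) = pre ++ f s :: suf := by
      simp
    rw [hget, hset]
    have h2 := ih (pre ++ [f s])
    simp only [List.length_append, List.length_cons, List.length_nil] at h2 ⊢
    push_cast at h2 ⊢
    simp only [List.map_cons]
    rw [show (pre.length : Int) + (↑suf.length + 1) = ↑pre.length + 1 + ↑suf.length by ring]
    rw [List.append_cons pre (f s) suf, List.append_cons pre (f s) (List.map f suf)]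
    exact h2

-- the two format pipelines agree
lemma pv_format_eq (w : List Char) : pvFormat w = pvFormatB w := by
  unfold pvFormat pvFormatB
  exact congrArg (PySem.Chars.join [' ']) (by
    simpa using pv_foldl_set_map pvCapitalize ([] : List Char)
      (PySem.Chars.split₀ (PySem.Chars.stripChars
        (PySem.Chars.replace (PySem.Chars.replace w ['-', ' '] [' ']) ['-', '\''] ['\''])
        ['-'])) [])

-- VCpronunciate on a single vowel is the svpron lookup
lemma pv_vc_single (ch : Char) (h : ch ∈ pvVOWELS) :
    pvVCpron [ch] = PySem.Dict.getD pvSVD ch [] ++ ['-'] := by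
  fin_cases h <;> decide

-- VCpronunciate on two vowels is the vv-token sound
lemma pv_vc_pair (x y : Char) (hx : x ∈ pvVOWELS) (hy : y ∈ pvVOWELS) :
    pvVCpron [x, y] = pvSound (PvTok.vv x y) := by
  fin_cases hx <;> fin_cases hy <;> decide

-- a trailing non-vowel contributes nothing to VCpronunciate
lemma pv_vc_pair_nv (x y : Char) (hx : x ∈ pvVOWELS) (hy : y ∉ pvVOWELS) :
    pvVCpron [x, y] = PySem.Dict.getD pvSVD x [] ++ ['-'] := by
  simp only [pvVOWELS, List.mem_cons, List.not_mem_nil, or_false, not_or] at hy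
  obtain ⟨h1, h2, h3, h4, h5⟩ := hy
  have h1' : ¬ ('a' = y) := fun h => h1 h.symm
  have h2' : ¬ ('e' = y) := fun h => h2 h.symm
  have h3' : ¬ ('i' = y) := fun h => h3 h.symm
  have h4' : ¬ ('o' = y) := fun h => h4 h.symm
  have h5' : ¬ ('u' = y) := fun h => h5 h.symm
  have hr : PySem.List.pyRange 0 (PySem.List.len pvVOWELS) 1 = [0, 1, 2, 3, 4] := by decide
  have g0 : PySem.List.pyGetD pvVOWELS 0 ' ' = 'a' := by decide
  have g1 : PySem.List.pyGetD pvVOWELS 1 ' ' = 'e' := by decide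
  have g2 : PySem.List.pyGetD pvVOWELS 2 ' ' = 'i' := by decide
  have g3 : PySem.List.pyGetD pvVOWELS 3 ' ' = 'o' := by decide
  have g4 : PySem.List.pyGetD pvVOWELS 4 ' ' = 'u' := by decide
  fin_cases hx <;>
  · unfold pvVCpron
    rw [if_pos (by simp [pvCOMBOS, h2, h3, h4, h5])]
    simp only [hr, List.foldl, g0, g1, g2, g3, g4]
    simp [h1', h2', h3', h4', h5', PySem.List.pyGetD, PySem.List.pyGet?]
    decide

-- the while loop of A produces exactly the rendered token list of B
lemma pv_loop_eq (n : Nat) : ∀ (l : List Char) (c : Nat) (res : List Char) (prev : Char),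
    l.length - c ≤ n →
    (c = 0 → l.getD 0 ' ' ≠ 'w') →
    (0 < c → prev = l.getD (c - 1) ' ') →
    pvLoopA l c res = res ++ (pvTokens prev (l.drop c)).flatMap pvSound := by
  induction n with
  | zero =>
    intro l c res prev hn hw hp
    rw [pvLoopA, dif_neg (by omega), List.drop_eq_nil_of_le (by omega)]
    simp [pvTokens]
  | succ n ih =>
    intro l c res prev hn hw hp
    by_cases h : c < l.length
    · rw [pvLoopA, dif_pos h, List.drop_eq_getElem_cons h]
      dsimp only
      have hgc : l.getD c ' ' = l[c] := List.getD_eq_getElem l ' ' h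
      by_cases hC : l[c] ∈ pvHCONS
      · rw [if_pos hC]
        rw [pvTokens.eq_def]
        dsimp only
        rw [if_pos hC]
        by_cases hwc : l[c] = 'w'
        · -- the 'w' lookback: c cannot be 0 here
          have hc0 : 0 < c := by
            rcases Nat.eq_zero_or_pos c with h0 | h0
            · exfalso
              apply hw h0
              subst h0
              rw [hgc, hwc]
            · exact h0
          have hprev : PySem.List.pyGetD l ((c : Int) - 1) ' ' = prev := by
            rw [show ((c : Int) - 1) = ((c - 1 : Nat) : Int) by omega,
              PySem.List.pyGetD_natCast, ← hp hc0]
          rw [if_pos hwc, if_pos hwc, hprev]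
          rw [ih l (c + 1) _ l[c] (by omega) (fun h0 => absurd h0 (by omega))
            (fun _ => by rw [Nat.add_sub_cancel, hgc])]
          simp [pvSound, pvWpron, List.flatMap_cons]
        · rw [if_neg hwc, if_neg hwc]
          rw [ih l (c + 1) _ l[c] (by omega) (fun h0 => absurd h0 (by omega))
            (fun _ => by rw [Nat.add_sub_cancel, hgc])]
          simp [pvSound, List.flatMap_cons]
      · rw [if_neg hC]
        rw [pvTokens.eq_def]
        dsimp only
        rw [if_neg hC]
        by_cases hV : l[c] ∈ pvVOWELS
        · rw [if_pos hV, if_pos hV]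
          by_cases hlast : c = l.length - 1
          · -- last char: single-vowel combo
            have hd1 : l.drop (c + 1) = [] := List.drop_eq_nil_of_le (by omega)
            rw [if_pos hlast, hd1]
            simp only [List.foldl, if_pos hV]
            rw [ih l (c + 1) _ l[c] (by omega) (fun h0 => absurd h0 (by omega))
              (fun _ => by rw [Nat.add_sub_cancel, hgc])]
            rw [hd1]
            simp [pvTokens, pvSound, pv_vc_single l[c] hV, List.flatMap_cons]
          · have hc1 : c + 1 < l.length := by omega
            have hg1 : PySem.List.pyGetD l ((c : Int) + 1) ' ' = l[c + 1] := by
              rw [show ((c : Int) + 1) = ((c + 1 : Nat) : Int) by omega,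
                PySem.List.pyGetD_natCast]
              exact List.getD_eq_getElem l ' ' hc1
            have hd1 : l.drop (c + 1) = l[c + 1] :: l.drop (c + 2) :=
              List.drop_eq_getElem_cons hc1
            rw [if_neg hlast, hg1, hd1]
            dsimp only
            by_cases hV2 : l[c + 1] ∈ pvVOWELS
            · rw [if_pos hV2]
              simp only [List.foldl, if_pos hV, if_pos hV2]
              rw [ih l (c + 2) _ l[c + 1] (by omega) (fun h0 => absurd h0 (by omega))
                (fun _ => by
                  rw [show c + 2 - 1 = c + 1 by omega, List.getD_eq_getElem l ' ' hc1])]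
              simp [pv_vc_pair l[c] l[c + 1] hV hV2, List.flatMap_cons]
            · rw [if_neg hV2]
              simp only [List.foldl, if_pos hV, if_neg hV2]
              rw [← hd1]
              rw [ih l (c + 1) _ l[c] (by omega) (fun h0 => absurd h0 (by omega))
                (fun _ => by rw [Nat.add_sub_cancel, hgc])]
              simp [pvSound, pv_vc_pair_nv l[c] l[c + 1] hV hV2, List.flatMap_cons]
        · rw [if_neg hV, if_neg hV]
          rw [ih l (c + 1) _ l[c] (by omega) (fun h0 => absurd h0 (by omega))
            (fun _ => by rw [Nat.add_sub_cancel, hgc])]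
          simp [pvSound, List.flatMap_cons]
    · rw [pvLoopA, dif_neg h, List.drop_eq_nil_of_le (by omega)]
      simp [pvTokens]

theorem pronunciate_spec : Claim_equal_pronunciate := by
  intro phrase _ hpre
  unfold Spec_pronunciate pronunciate pronunciate_alt
  have hne : PySem.Chars.lower phrase.toList ≠ [] := by
    intro h'
    simp only [PySem.Chars.lower, List.map_eq_nil_iff] at h'
    exact hpre (String.toList_eq_nil_iff.mp h')
  rcases hl : PySem.Chars.lower phrase.toList with _ | ⟨c0, r0⟩
  · exact absurd hl hne
  · dsimp only
    rw [PySem.List.pyGetD_zero_cons]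
    by_cases hw : c0 = 'w'
    · rw [if_pos hw, if_pos hw]
      dsimp only
      rw [pv_loop_eq (c0 :: r0).length (c0 :: r0) 1 ['w'] 'w' (by omega)
        (by omega) (by intro _; simp [hw])]
      simp [pv_format_eq]
    · rw [if_neg hw, if_neg hw]
      dsimp only
      rw [pv_loop_eq (c0 :: r0).length (c0 :: r0) 0 [] c0 (by omega)
        (by intro _; simpa using hw) (by omega)]
      simp [pv_format_eq]
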